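-- pv_equiv track=rewrite | github.com/MatheusMuinos/P3.Administracion.Sys.Redes | ej3teste/ej3.py | atribuir_etiquetas
-- ===== SOURCE A (Python) =====
-- def atribuir_etiquetas(dados, centros):
--     etiquetas = []
--     for x in dados:
--         menor_dist = abs(x - centros[0])
--         etiqueta = 1
--         for j in range(1, len(centros)):
--             dist = abs(x - centros[j])
--             if dist < menor_dist:
--                 menor_dist = dist
--                 etiqueta = j + 1
--         etiquetas.append(etiqueta)
--     return etiquetas
-- ===== SOURCE B (Python) =====
-- def atribuir_etiquetas(dados, centros):
--     # First-occurrence label (1-based) for each distinct center value.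
--     first = {}
--     for i, c in enumerate(centros):
--         if c not in first:
--             first[c] = i + 1
--     vals = sorted(first)              # strictly increasing distinct center values
--     labs = [first[v] for v in vals]   # label of each distinct value
--     m = len(vals)
--     etiquetas = []
--     for x in dados:
--         # bisect_left: first index lo with vals[lo] >= x
--         lo, hi = 0, m
--         while lo < hi:
--             mid = (lo + hi) // 2
--             if vals[mid] < x:
--                 lo = mid + 1
--             else:
--                 hi = mid
--         if lo == 0:
--             best = 0
--         elif lo == m:
--             best = m - 1
--         else:
--             dl = x - vals[lo - 1]
--             dr = vals[lo] - x
--             if dl < dr or (dl == dr and labs[lo - 1] < labs[lo]):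
--                 best = lo - 1
--             else:
--                 best = lo
--         etiquetas.append(labs[best])
--     return etiquetas
-- ===== Notes on version B (the rewrite author's own statement) =====
-- stated objective: faster
-- what changed: Instead of scanning all centers for every point, B builds a first-occurrence label table of the distinct center values, sorts them once, and binary-searches each point's insertion position, comparing only the two sorted neighbours (ties go to the smaller first-occurrence label).
import Mathlib
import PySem

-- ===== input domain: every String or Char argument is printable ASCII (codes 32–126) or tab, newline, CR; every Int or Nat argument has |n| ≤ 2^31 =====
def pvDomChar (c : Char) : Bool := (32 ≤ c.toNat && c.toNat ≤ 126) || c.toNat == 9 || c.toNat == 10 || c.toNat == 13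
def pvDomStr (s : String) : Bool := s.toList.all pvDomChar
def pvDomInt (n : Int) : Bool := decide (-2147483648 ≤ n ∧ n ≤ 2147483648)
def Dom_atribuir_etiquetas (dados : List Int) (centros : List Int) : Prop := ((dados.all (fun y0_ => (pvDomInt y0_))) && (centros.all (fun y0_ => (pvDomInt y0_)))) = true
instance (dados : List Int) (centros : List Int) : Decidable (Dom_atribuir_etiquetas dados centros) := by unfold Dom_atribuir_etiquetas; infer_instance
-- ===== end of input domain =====

-- B replaces A's per-point scan of all centers by a sorted table of distinct center
-- values (labelled by first occurrence) plus a per-point binary search; asymptotically faster.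


-- ===== PORT A =====
-- centros[0] is ported with pyGetD (default never reached: Pre_ requires centros ≠ []).
def atribuir_etiquetas (dados : List Int) (centros : List Int) : List Int :=
  dados.foldl (fun etiquetas x =>
    let menor_dist : Int := |x - PySem.List.pyGetD centros 0 0|
    let st := (PySem.List.pyRange 1 (centros.length : Int) 1).foldl
      (fun (st : Int × Int) j =>
        let dist : Int := |x - PySem.List.pyGetD centros j 0|
        if dist < st.1 then (dist, j + 1) else st)
      (menor_dist, 1)
    etiquetas ++ [st.2]) []

-- ===== PORT B =====
-- B-side helpers: first-occurrence dict, the hand-written bisect_left loop, per-point label.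
def pvFirstStep (d : PySem.Dict Int Int) (ic : Int × Int) : PySem.Dict Int Int :=
  if PySem.Dict.contains d ic.2 then d else PySem.Dict.insert d ic.2 (ic.1 + 1)

def pvFirst (centros : List Int) : PySem.Dict Int Int :=
  (PySem.List.enumerate centros 0).foldl pvFirstStep PySem.Dict.empty

-- the 'while lo < hi' loop of Source B (indexing total via pyGetD: 0 ≤ mid < len inside the loop)
def pvBisect (vals : List Int) (x : Int) (lo hi : Int) : Int :=
  if h : lo < hi then
    let mid := PySem.Int.floordiv (lo + hi) 2
    if PySem.List.pyGetD vals mid 0 < x then pvBisect vals x (mid + 1) hi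
    else pvBisect vals x lo mid
  else lo
termination_by (hi - lo).toNat
decreasing_by
  · have _h1 := PySem.Int.floordiv_two_mid_bounds (le_of_lt h)
    omega
  · have h1 := PySem.Int.floordiv_two_mid_bounds (le_of_lt h)
    have h2 : PySem.Int.floordiv (lo + hi) 2 < hi := by
      rw [PySem.Int.floordiv_lt_iff_lt_mul (by omega)]; omega
    omega

-- the body of Source B's 'for x in dados' loop
def pvLabel (vals labs : List Int) (m : Int) (x : Int) : Int :=
  let lo := pvBisect vals x 0 m
  let best : Int :=
    if lo = 0 then 0
    else if lo = m then m - 1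
    else
      let dl := x - PySem.List.pyGetD vals (lo - 1) 0
      let dr := PySem.List.pyGetD vals lo 0 - x
      if dl < dr ∨ (dl = dr ∧ PySem.List.pyGetD labs (lo - 1) 0 < PySem.List.pyGetD labs lo 0)
      then lo - 1 else lo
  PySem.List.pyGetD labs best 0

def atribuir_etiquetas_alt (dados : List Int) (centros : List Int) : List Int :=
  let first := pvFirst centros
  let vals := PySem.List.sorted (PySem.Dict.keys first) (fun v => v) false
  let labs := vals.map (fun v => PySem.Dict.getD first v 0)
  let m : Int := (vals.length : Int)
  dados.foldl (fun etiquetas x => etiquetas ++ [pvLabel vals labs m x]) []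

-- ===== PRECONDITION & SPEC =====
-- Pre_ excludes exactly the inputs where A raises: centros = [] (IndexError on centros[0]).
def Pre_atribuir_etiquetas (dados : List Int) (centros : List Int) : Prop := centros ≠ []
instance (dados : List Int) (centros : List Int) : Decidable (Pre_atribuir_etiquetas dados centros) := by
  unfold Pre_atribuir_etiquetas; infer_instance

def pvWitness_atribuir_etiquetas : List Int × List Int := ([2, -1, 5], [0, 4, 0])

def Spec_atribuir_etiquetas (dados : List Int) (centros : List Int) (out : List Int) : Prop := out = atribuir_etiquetas_alt dados centros
instance (dados : List Int) (centros : List Int) (out : List Int) : Decidable (Spec_atribuir_etiquetas dados centros out) := by unfold Spec_atribuir_etiquetas; infer_instance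

-- ===== CLAIM (what is proved, stated in full; the proofs are below) =====
def Claim_equal_atribuir_etiquetas : Prop := ∀ (dados : List Int) (centros : List Int), Dom_atribuir_etiquetas dados centros → Pre_atribuir_etiquetas dados centros → Spec_atribuir_etiquetas dados centros (atribuir_etiquetas dados centros)

-- ===== LEMMAS AND PROOFS =====

-- distance used by both programs
def pvDist (x c : Int) : Int := |x - c|

-- proof-side names for B's tables (the port builds the same values via lets)
def pvVals (cs : List Int) : List Int :=
  PySem.List.sorted (PySem.Dict.keys (pvFirst cs)) (fun v => v) false
def pvLabs (cs : List Int) : List Int :=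
  (pvVals cs).map (fun v => PySem.Dict.getD (pvFirst cs) v 0)

-- A's inner-loop step, named for the proofs (definitionally the port's lambda)
def pvStepA (x : Int) (cs : List Int) (st : Int × Int) (j : Int) : Int × Int :=
  if |x - PySem.List.pyGetD cs j 0| < st.1 then (|x - PySem.List.pyGetD cs j 0|, j + 1) else st

-- characterisation shared by both programs: st is (minimal distance over the first n
-- centers, 1-based index of the FIRST center attaining it)
def pvBest (x : Int) (cs : List Int) (st : Int × Int) (n : Nat) : Prop :=
  ∃ i : Nat, i < n ∧ i < cs.length ∧ st = (pvDist x (cs.getD i 0), (i : Int) + 1) ∧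
    (∀ j : Nat, j < n → j < cs.length → st.1 ≤ pvDist x (cs.getD j 0)) ∧
    (∀ j : Nat, j < i → st.1 < pvDist x (cs.getD j 0))

lemma pvBest_unique {x : Int} {cs : List Int} {st st' : Int × Int} {n : Nat}
    (h1 : pvBest x cs st n) (h2 : pvBest x cs st' n) : st = st' := by
  obtain ⟨i, hin, hil, hst, hmin, hstr⟩ := h1
  obtain ⟨i', hin', hil', hst', hmin', hstr'⟩ := h2
  have e1 : st.1 = pvDist x (cs.getD i 0) := by rw [hst]
  have e1' : st'.1 = pvDist x (cs.getD i' 0) := by rw [hst']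
  rcases lt_trichotomy i i' with h | h | h
  · exfalso
    have hlt := hstr' i h
    have hle := hmin i' hin' hil'
    omega
  · subst h; rw [hst, hst']
  · exfalso
    have hlt := hstr i' h
    have hle := hmin' i hin hil
    omega

-- ---------- A side ----------

lemma pvFoldA_best (x : Int) (cs : List Int) (hcs : cs ≠ []) :
    ∀ n : Nat, 1 ≤ n → n ≤ cs.length →
    pvBest x cs
      ((PySem.List.pyRange 1 (n : Int) 1).foldl (pvStepA x cs) (pvDist x (cs.getD 0 0), 1)) n := by
  have hlen0 : 0 < cs.length := List.length_pos_iff.mpr hcs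
  intro n
  induction n with
  | zero => intro h1 _; exact absurd h1 (by omega)
  | succ n ih =>
    intro _ hlen
    by_cases hn : n = 0
    · subst hn
      rw [show (((0:Nat)+1 : Nat) : Int) = 1 by norm_num,
          PySem.List.pyRange_one_eq_nil (le_refl 1)]
      refine ⟨0, by omega, hlen0, rfl, ?_, ?_⟩
      · intro j hj _
        interval_cases j
        exact le_refl _
      · intro j hj; omega
    · obtain ⟨i, hin, hil, hst, hmin, hstr⟩ := ih (by omega) (by omega)
      have hcast : (((n+1 : Nat)) : Int) = (n : Int) + 1 := by push_cast; ring
      rw [hcast, PySem.List.pyRange_one_succ_right (by exact_mod_cast (by omega : 1 ≤ n)),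
          List.foldl_append, List.foldl_cons, List.foldl_nil]
      set stp := (PySem.List.pyRange 1 (n : Int) 1).foldl (pvStepA x cs)
        (pvDist x (cs.getD 0 0), 1) with hstp
      unfold pvStepA
      have hget : PySem.List.pyGetD cs ((n : Nat) : Int) 0 = cs.getD n 0 :=
        PySem.List.pyGetD_natCast cs n 0
      rw [hget]
      split
      next hlt =>
        refine ⟨n, by omega, by omega, rfl, ?_, ?_⟩
        · intro j hj hjl
          show |x - cs.getD n 0| ≤ |x - cs.getD j 0|
          rcases Nat.lt_succ_iff_lt_or_eq.mp hj with h | h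
          · have h1 : stp.1 ≤ |x - cs.getD j 0| := hmin j h hjl
            omega
          · subst h; omega
        · intro j hj
          show |x - cs.getD n 0| < |x - cs.getD j 0|
          have h1 : stp.1 ≤ |x - cs.getD j 0| := hmin j hj (by omega)
          omega
      next hge =>
        refine ⟨i, by omega, hil, hst, ?_, ?_⟩
        · intro j hj hjl
          rcases Nat.lt_succ_iff_lt_or_eq.mp hj with h | h
          · exact hmin j h hjl
          · show stp.1 ≤ |x - cs.getD j 0|
            rw [h]
            omega
        · exact hstr

lemma pvA_eq_map (dados cs : List Int) :
    atribuir_etiquetas dados cs =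
      dados.map (fun x =>
        ((PySem.List.pyRange 1 (cs.length : Int) 1).foldl (pvStepA x cs)
          (pvDist x (cs.getD 0 0), 1)).2) := by
  have h : atribuir_etiquetas dados cs =
      dados.foldl (fun acc x => acc ++ [(fun x =>
        ((PySem.List.pyRange 1 (cs.length : Int) 1).foldl (pvStepA x cs)
          (pvDist x (PySem.List.pyGetD cs 0 0), 1)).2) x]) [] := rfl
  rw [h, PySem.List.foldl_append_singleton_eq_map, List.nil_append]
  simp only [PySem.List.pyGetD_zero]

-- ---------- B side: the first-occurrence dict ----------

lemma pvFirst_get?_aux (v : Int) :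
    ∀ (l : List Int) (s : Int) (d : PySem.Dict Int Int),
    ((PySem.List.enumerate l s).foldl pvFirstStep d).get? v =
      (d.get? v).or ((PySem.List.index? l v).map (fun (n : Nat) => s + (n : Int) + 1)) := by
  intro l
  induction l with
  | nil =>
    intro s d
    have hnone : PySem.List.index? ([] : List Int) v = none :=
      (PySem.List.index?_eq_none_iff _ _).mpr (by simp)
    rw [PySem.List.enumerate_nil, List.foldl_nil, hnone]
    cases d.get? v <;> simp
  | cons c t ih =>
    intro s d
    rw [PySem.List.enumerate_cons, List.foldl_cons, ih (s+1) (pvFirstStep d (s, c))]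
    have hstep : pvFirstStep d (s, c) =
        if (d.get? c).isSome then d else d.insert c (s + 1) := by
      unfold pvFirstStep
      rw [PySem.Dict.contains_eq_isSome_get?]
    rw [hstep]
    by_cases hvc : v = c
    · subst hvc
      cases hd : d.get? v with
      | some w => simp [hd]
      | none =>
        rw [if_neg (by simp), PySem.Dict.get?_insert, if_pos rfl,
            PySem.List.index?_cons_self]
        simp
    · have hcv : c ≠ v := fun h => hvc h.symm
      have hidx := PySem.List.index?_cons_of_ne (x := c) (v := v) t hcv
      have hshift : (Option.map (fun x => x + 1) (PySem.List.index? t v)).map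
            (fun (n : Nat) => s + (n : Int) + 1) =
          (PySem.List.index? t v).map (fun (n : Nat) => (s + 1) + (n : Int) + 1) := by
        cases ht : PySem.List.index? t v with
        | none => simp
        | some k => simp only [Option.map_some]; congr 1; push_cast; ring
      cases hd : d.get? c with
      | some w => rw [if_pos (by simp), hidx, hshift]
      | none => rw [if_neg (by simp), PySem.Dict.get?_insert, if_neg hvc, hidx, hshift]

lemma pvFirst_get? (cs : List Int) (v : Int) :
    (pvFirst cs).get? v =
      (PySem.List.index? cs v).map (fun (n : Nat) => (n : Int) + 1) := by
  unfold pvFirst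
  rw [pvFirst_get?_aux v cs 0 PySem.Dict.empty, PySem.Dict.get?_empty, Option.none_or]
  cases h : PySem.List.index? cs v with
  | none => simp
  | some k => simp only [Option.map_some]; congr 1; ring

lemma pvFirst_nodup_aux : ∀ (l : List (Int × Int)) (d : PySem.Dict Int Int),
    d.keys.Nodup → (l.foldl pvFirstStep d).keys.Nodup := by
  intro l
  induction l with
  | nil => intro d h; exact h
  | cons p t ih =>
    intro d h
    rw [List.foldl_cons]
    apply ih
    unfold pvFirstStep
    split
    · exact h
    · exact PySem.Dict.nodup_keys_insert _ _ _ h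

lemma pvFirst_nodup_keys (cs : List Int) : (pvFirst cs).keys.Nodup :=
  pvFirst_nodup_aux _ _ PySem.Dict.nodup_keys_empty

lemma pvLab_spec (cs : List Int) {v : Int} (hv : v ∈ cs) :
    ∃ n : Nat, PySem.List.index? cs v = some n ∧
      PySem.Dict.getD (pvFirst cs) v 0 = (n : Int) + 1 := by
  cases h : PySem.List.index? cs v with
  | none => exact absurd ((PySem.List.index?_eq_none_iff _ _).mp h) (by simp [hv])
  | some n =>
    refine ⟨n, rfl, ?_⟩
    rw [PySem.Dict.getD_eq_get?_getD, pvFirst_get? cs v, h]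
    rfl

-- ---------- B side: the sorted value table ----------

lemma pvVals_mem (cs : List Int) (v : Int) : v ∈ pvVals cs ↔ v ∈ cs := by
  unfold pvVals
  rw [PySem.List.mem_sorted]
  constructor
  · intro h
    by_contra hv
    have : (pvFirst cs).get? v = none := by
      rw [pvFirst_get?, (PySem.List.index?_eq_none_iff _ _).mpr hv]; rfl
    exact (PySem.Dict.get?_eq_none_iff_not_mem_keys _ _).mp this h
  · intro h
    by_contra hk
    have := (PySem.Dict.get?_eq_none_iff_not_mem_keys (pvFirst cs) v).mpr hk
    rw [pvFirst_get?] at this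
    cases hidx : PySem.List.index? cs v with
    | none => exact absurd ((PySem.List.index?_eq_none_iff _ _).mp hidx) (by simp [h])
    | some n => rw [hidx] at this; simp at this

lemma pvVals_nodup (cs : List Int) : (pvVals cs).Nodup :=
  ((PySem.List.sorted_perm _ _ _).nodup_iff).mpr (pvFirst_nodup_keys cs)

lemma pvVals_sorted_lt (cs : List Int) : (pvVals cs).Pairwise (· < ·) := by
  have h1 : (pvVals cs).Pairwise (fun a b => a ≤ b) :=
    PySem.List.sorted_pairwise (PySem.Dict.keys (pvFirst cs)) (fun v => v)
  have h2 : (pvVals cs).Pairwise (fun a b => a ≠ b) := pvVals_nodup cs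
  exact (h1.and h2).imp (fun h => lt_of_le_of_ne h.1 h.2)

lemma pvMonoLt {vals : List Int} (hs : vals.Pairwise (· < ·)) {p q : Nat}
    (hq : q < vals.length) (hpq : p < q) : vals.getD p 0 < vals.getD q 0 := by
  have := (List.pairwise_iff_getElem.mp hs) p q (by omega) hq hpq
  rwa [List.getD_eq_getElem _ _ (by omega), List.getD_eq_getElem _ _ hq]

lemma pvLabs_getD (cs : List Int) {t : Nat} (ht : t < (pvVals cs).length) :
    (pvLabs cs).getD t 0 = PySem.Dict.getD (pvFirst cs) ((pvVals cs).getD t 0) 0 := by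
  unfold pvLabs
  rw [List.getD_eq_getElem _ _ (by simpa using ht), List.getElem_map,
      List.getD_eq_getElem _ _ ht]

lemma pvVals_getD_mem (cs : List Int) {t : Nat} (ht : t < (pvVals cs).length) :
    (pvVals cs).getD t 0 ∈ cs := by
  rw [← pvVals_mem cs, List.getD_eq_getElem _ _ ht]
  exact List.getElem_mem ht

lemma pvLabs_inj (cs : List Int) {t t' : Nat}
    (ht : t < (pvVals cs).length) (ht' : t' < (pvVals cs).length) (hne : t ≠ t') :
    (pvLabs cs).getD t 0 ≠ (pvLabs cs).getD t' 0 := by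
  have hvne : (pvVals cs).getD t 0 ≠ (pvVals cs).getD t' 0 := by
    rw [List.getD_eq_getElem _ _ ht, List.getD_eq_getElem _ _ ht']
    exact fun h => hne ((List.Nodup.getElem_inj_iff (pvVals_nodup cs)).mp h)
  obtain ⟨n, hn, hl⟩ := pvLab_spec cs (pvVals_getD_mem cs ht)
  obtain ⟨n', hn', hl'⟩ := pvLab_spec cs (pvVals_getD_mem cs ht')
  obtain ⟨hklen, hcsk, _⟩ := PySem.List.getElem_of_index?_eq_some hn
  obtain ⟨hklen', hcsk', _⟩ := PySem.List.getElem_of_index?_eq_some hn'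
  rw [pvLabs_getD cs ht, pvLabs_getD cs ht', hl, hl']
  intro h
  have : n = n' := by omega
  subst this
  exact hvne (by rw [← hcsk, ← hcsk'])

-- ---------- B side: binary search ----------

lemma pvBisect_spec (vals : List Int) (x : Int) (hs : vals.Pairwise (· < ·)) :
    ∀ (fuel : Nat) (lo hi : Int), (hi - lo).toNat = fuel → 0 ≤ lo → lo ≤ hi →
    hi ≤ (vals.length : Int) →
    (∀ i : Nat, i < vals.length → (i : Int) < lo → vals.getD i 0 < x) →
    (∀ i : Nat, i < vals.length → hi ≤ (i : Int) → x ≤ vals.getD i 0) →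
    0 ≤ pvBisect vals x lo hi ∧ pvBisect vals x lo hi ≤ (vals.length : Int) ∧
    (∀ i : Nat, i < vals.length → (i : Int) < pvBisect vals x lo hi → vals.getD i 0 < x) ∧
    (∀ i : Nat, i < vals.length → pvBisect vals x lo hi ≤ (i : Int) → x ≤ vals.getD i 0) := by
  intro fuel
  induction fuel using Nat.strong_induction_on with
  | _ fuel ih =>
    intro lo hi hfuel h0 hlh hhl hlow hhigh
    rw [pvBisect]
    split
    case isTrue h =>
      have hmid := PySem.Int.floordiv_two_mid_bounds (le_of_lt h)
      have hmidlt : PySem.Int.floordiv (lo + hi) 2 < hi := by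
        rw [PySem.Int.floordiv_lt_iff_lt_mul (by omega)]; omega
      set mid := PySem.Int.floordiv (lo + hi) 2 with hm
      have hmid0 : 0 ≤ mid := by omega
      have hmidlen : mid.toNat < vals.length := by omega
      have hget : PySem.List.pyGetD vals mid 0 = vals.getD mid.toNat 0 :=
        PySem.List.pyGetD_of_nonneg vals 0 hmid0
      simp only [hget]
      split
      case isTrue hlt =>
        apply ih (hi - (mid + 1)).toNat (by omega) (mid + 1) hi rfl (by omega) (by omega) hhl
        · intro i hi1 hi2
          rcases lt_or_ge (i : Int) lo with hc | hc
          · exact hlow i hi1 hc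
          · rcases Nat.lt_or_ge i mid.toNat with hcc | hcc
            · exact lt_trans (pvMonoLt hs hmidlen hcc) hlt
            · have : i = mid.toNat := by omega
              subst this; exact hlt
        · exact hhigh
      case isFalse hge =>
        apply ih (mid - lo).toNat (by omega) lo mid rfl h0 (by omega) (by omega) hlow
        intro i hi1 hi2
        have hxm : x ≤ vals.getD mid.toNat 0 := le_of_not_gt hge
        rcases Nat.lt_or_ge mid.toNat i with hcc | hcc
        · exact le_of_lt (lt_of_le_of_lt hxm (pvMonoLt hs hi1 hcc))
        · have : i = mid.toNat := by omega
          subst this; exact hxm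
    case isFalse h =>
      refine ⟨by omega, by omega, ?_, ?_⟩
      · intro i h1 h2; exact hlow i h1 h2
      · intro i h1 h2; exact hhigh i h1 (by omega)

-- ---------- B side: the chosen index is the lexicographic best ----------

lemma pvLex_to_best (cs : List Int) (x : Int) (bn : Nat) (hbn : bn < (pvVals cs).length)
    (hlex : ∀ t : Nat, t < (pvVals cs).length → t ≠ bn →
      pvDist x ((pvVals cs).getD bn 0) < pvDist x ((pvVals cs).getD t 0) ∨
      (pvDist x ((pvVals cs).getD bn 0) = pvDist x ((pvVals cs).getD t 0) ∧
       (pvLabs cs).getD bn 0 < (pvLabs cs).getD t 0)) :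
    pvBest x cs (pvDist x ((pvVals cs).getD bn 0), (pvLabs cs).getD bn 0) cs.length := by
  obtain ⟨nstar, hidx, hlab⟩ := pvLab_spec cs (pvVals_getD_mem cs hbn)
  obtain ⟨hnlen, hcsn, hfirst⟩ := PySem.List.getElem_of_index?_eq_some hidx
  have hlabs_bn : (pvLabs cs).getD bn 0 = (nstar : Int) + 1 := by
    rw [pvLabs_getD cs hbn, hlab]
  have hcsget : cs.getD nstar 0 = (pvVals cs).getD bn 0 := by
    rw [List.getD_eq_getElem _ _ hnlen, hcsn]
  have hfind : ∀ j : Nat, j < cs.length →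
      ∃ t : Nat, t < (pvVals cs).length ∧ (pvVals cs).getD t 0 = cs.getD j 0 := by
    intro j hj
    have : cs.getD j 0 ∈ pvVals cs := by
      rw [pvVals_mem, List.getD_eq_getElem _ _ hj]
      exact List.getElem_mem hj
    obtain ⟨t, htl, hteq⟩ := List.getElem_of_mem this
    exact ⟨t, htl, by rw [List.getD_eq_getElem _ _ htl, hteq]⟩
  refine ⟨nstar, hnlen, hnlen, by rw [hcsget, hlabs_bn], ?_, ?_⟩
  · intro j hj hjl
    obtain ⟨t, htl, hteq⟩ := hfind j hjl
    by_cases ht : t = bn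
    · rw [ht] at hteq
      show pvDist x ((pvVals cs).getD bn 0) ≤ pvDist x (cs.getD j 0)
      rw [← hteq]
    · rcases hlex t htl ht with h | h
      · show pvDist x ((pvVals cs).getD bn 0) ≤ pvDist x (cs.getD j 0)
        rw [← hteq]; exact le_of_lt h
      · show pvDist x ((pvVals cs).getD bn 0) ≤ pvDist x (cs.getD j 0)
        rw [← hteq]; exact le_of_eq h.1
  · intro j hjn
    have hjl : j < cs.length := by omega
    obtain ⟨t, htl, hteq⟩ := hfind j hjl
    by_cases ht : t = bn
    · exfalso
      rw [ht] at hteq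
      have : cs[j]'hjl = (pvVals cs).getD bn 0 := by
        rw [← List.getD_eq_getElem cs 0 hjl, hteq]
      exact hfirst j hjn this
    · rcases hlex t htl ht with h | h
      · show pvDist x ((pvVals cs).getD bn 0) < pvDist x (cs.getD j 0)
        rw [← hteq]; exact h
      · exfalso
        obtain ⟨nc, hidxc, hlabc⟩ := pvLab_spec cs (pvVals_getD_mem cs htl)
        obtain ⟨hnclen, hcsnc, hfirstc⟩ := PySem.List.getElem_of_index?_eq_some hidxc
        have hlabs_t : (pvLabs cs).getD t 0 = (nc : Int) + 1 := by
          rw [pvLabs_getD cs htl, hlabc]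
        have hncj : nc ≤ j := by
          by_contra hcon
          exact hfirstc j (by omega) (by rw [← List.getD_eq_getElem cs 0 hjl, hteq])
        have hlt := h.2
        rw [hlabs_bn, hlabs_t] at hlt
        omega

-- ---------- B side: per-point label is the best ----------

lemma pvLabel_best (cs : List Int) (hcs : cs ≠ []) (x : Int) :
    ∃ st : Int × Int, pvBest x cs st cs.length ∧
      st.2 = pvLabel (pvVals cs) (pvLabs cs) ((pvVals cs).length : Int) x := by
  have hsort := pvVals_sorted_lt cs
  obtain ⟨c0, hc0⟩ := List.exists_mem_of_ne_nil cs hcs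
  have hm0 : 0 < (pvVals cs).length := List.length_pos_iff.mpr (fun h => by
    rw [← pvVals_mem cs c0, h] at hc0; simp at hc0)
  have hlabel : pvLabel (pvVals cs) (pvLabs cs) ((pvVals cs).length : Int) x =
      PySem.List.pyGetD (pvLabs cs)
        (if pvBisect (pvVals cs) x 0 ((pvVals cs).length : Int) = 0 then 0
         else if pvBisect (pvVals cs) x 0 ((pvVals cs).length : Int) = ((pvVals cs).length : Int)
           then ((pvVals cs).length : Int) - 1
         else if x - PySem.List.pyGetD (pvVals cs) (pvBisect (pvVals cs) x 0 ((pvVals cs).length : Int) - 1) 0 <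
                  PySem.List.pyGetD (pvVals cs) (pvBisect (pvVals cs) x 0 ((pvVals cs).length : Int)) 0 - x ∨
                (x - PySem.List.pyGetD (pvVals cs) (pvBisect (pvVals cs) x 0 ((pvVals cs).length : Int) - 1) 0 =
                  PySem.List.pyGetD (pvVals cs) (pvBisect (pvVals cs) x 0 ((pvVals cs).length : Int)) 0 - x ∧
                 PySem.List.pyGetD (pvLabs cs) (pvBisect (pvVals cs) x 0 ((pvVals cs).length : Int) - 1) 0 <
                 PySem.List.pyGetD (pvLabs cs) (pvBisect (pvVals cs) x 0 ((pvVals cs).length : Int)) 0)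
           then pvBisect (pvVals cs) x 0 ((pvVals cs).length : Int) - 1
           else pvBisect (pvVals cs) x 0 ((pvVals cs).length : Int)) 0 := rfl
  obtain ⟨hr0, hrlen, hlow, hhigh⟩ := pvBisect_spec (pvVals cs) x hsort
      (((pvVals cs).length : Int) - 0).toNat 0 ((pvVals cs).length : Int) rfl (le_refl 0)
      (by omega) (le_refl _)
      (fun i _ hi => absurd hi (by omega))
      (fun i hilen hmi => absurd hmi (by omega))
  generalize hr : pvBisect (pvVals cs) x 0 ((pvVals cs).length : Int) = r
    at hlabel hr0 hrlen hlow hhigh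
  by_cases hc1 : r = 0
  · rw [if_pos hc1] at hlabel
    refine ⟨(pvDist x ((pvVals cs).getD 0 0), (pvLabs cs).getD 0 0),
      pvLex_to_best cs x 0 hm0 ?_, ?_⟩
    · intro t htl htne
      left
      have h0 : x ≤ (pvVals cs).getD 0 0 := hhigh 0 hm0 (by omega)
      have ht : x ≤ (pvVals cs).getD t 0 := hhigh t htl (by omega)
      have hmono := pvMonoLt hsort htl (Nat.pos_of_ne_zero htne)
      unfold pvDist
      rw [abs_of_nonpos (by omega), abs_of_nonpos (by omega)]
      omega
    · rw [hlabel, PySem.List.pyGetD_zero]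
  · by_cases hc2 : r = ((pvVals cs).length : Int)
    · rw [if_neg hc1, if_pos hc2] at hlabel
      have hgetlab : PySem.List.pyGetD (pvLabs cs) (((pvVals cs).length : Int) - 1) 0 =
          (pvLabs cs).getD ((pvVals cs).length - 1) 0 := by
        rw [PySem.List.pyGetD_of_nonneg _ _ (by omega)]
        congr 1
        omega
      refine ⟨(pvDist x ((pvVals cs).getD ((pvVals cs).length - 1) 0),
          (pvLabs cs).getD ((pvVals cs).length - 1) 0),
        pvLex_to_best cs x ((pvVals cs).length - 1) (by omega) ?_, ?_⟩
      · intro t htl htne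
        left
        have h1 : (pvVals cs).getD t 0 < x := hlow t htl (by omega)
        have h2 : (pvVals cs).getD ((pvVals cs).length - 1) 0 < x :=
          hlow _ (by omega) (by omega)
        have hmono := pvMonoLt hsort (by omega : (pvVals cs).length - 1 < (pvVals cs).length)
          (by omega : t < (pvVals cs).length - 1)
        unfold pvDist
        rw [abs_of_pos (by omega), abs_of_pos (by omega)]
        omega
      · rw [hlabel, hgetlab]
    · rw [if_neg hc1, if_neg hc2] at hlabel
      have h0r : 0 < r := by omega
      have hrm : r < ((pvVals cs).length : Int) := by omega
      have hRlen : r.toNat < (pvVals cs).length := by omega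
      have hgetL : PySem.List.pyGetD (pvVals cs) (r - 1) 0 =
          (pvVals cs).getD (r.toNat - 1) 0 := by
        rw [PySem.List.pyGetD_of_nonneg _ _ (by omega)]; congr 1; omega
      have hgetR : PySem.List.pyGetD (pvVals cs) r 0 = (pvVals cs).getD r.toNat 0 := by
        rw [PySem.List.pyGetD_of_nonneg _ _ (by omega)]
      have hlabsL : PySem.List.pyGetD (pvLabs cs) (r - 1) 0 =
          (pvLabs cs).getD (r.toNat - 1) 0 := by
        rw [PySem.List.pyGetD_of_nonneg _ _ (by omega)]; congr 1; omega
      have hlabsR : PySem.List.pyGetD (pvLabs cs) r 0 = (pvLabs cs).getD r.toNat 0 := by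
        rw [PySem.List.pyGetD_of_nonneg _ _ (by omega)]
      rw [hgetL, hgetR, hlabsL, hlabsR] at hlabel
      have hvL : (pvVals cs).getD (r.toNat - 1) 0 < x := hlow _ (by omega) (by omega)
      have hvR : x ≤ (pvVals cs).getD r.toNat 0 := hhigh _ hRlen (by omega)
      by_cases hcond : (x - (pvVals cs).getD (r.toNat - 1) 0 <
            (pvVals cs).getD r.toNat 0 - x ∨
          (x - (pvVals cs).getD (r.toNat - 1) 0 = (pvVals cs).getD r.toNat 0 - x ∧
           (pvLabs cs).getD (r.toNat - 1) 0 < (pvLabs cs).getD r.toNat 0))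
      · rw [if_pos hcond, hlabsL] at hlabel
        refine ⟨(pvDist x ((pvVals cs).getD (r.toNat - 1) 0),
            (pvLabs cs).getD (r.toNat - 1) 0),
          pvLex_to_best cs x (r.toNat - 1) (by omega) ?_, by rw [hlabel]⟩
        intro t htl htne
        rcases Nat.lt_trichotomy t (r.toNat - 1) with htc | htc | htc
        · left
          have h1 : (pvVals cs).getD t 0 < x := hlow t htl (by omega)
          have hmono := pvMonoLt hsort (by omega : r.toNat - 1 < (pvVals cs).length) htc
          unfold pvDist
          rw [abs_of_pos (by omega), abs_of_pos (by omega)]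
          omega
        · exact absurd htc htne
        · by_cases htR' : t = r.toNat
          · subst htR'
            rcases hcond with h | ⟨h1, h2⟩
            · left
              unfold pvDist
              rw [abs_of_pos (by omega), abs_of_nonpos (by omega)]
              omega
            · right
              refine ⟨?_, h2⟩
              unfold pvDist
              rw [abs_of_pos (by omega), abs_of_nonpos (by omega)]
              omega
          · left
            have hx : x ≤ (pvVals cs).getD t 0 := hhigh t htl (by omega)
            have hmono := pvMonoLt hsort htl (by omega : r.toNat < t)
            have hdl_le : x - (pvVals cs).getD (r.toNat - 1) 0 ≤
                (pvVals cs).getD r.toNat 0 - x := by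
              rcases hcond with h | ⟨h1, _⟩ <;> omega
            unfold pvDist
            rw [abs_of_pos (by omega), abs_of_nonpos (by omega)]
            omega
      · rw [if_neg hcond, hlabsR] at hlabel
        have hnd : (pvVals cs).getD r.toNat 0 - x ≤ x - (pvVals cs).getD (r.toNat - 1) 0 :=
          le_of_not_gt (fun hgt => hcond (Or.inl hgt))
        have himp : x - (pvVals cs).getD (r.toNat - 1) 0 = (pvVals cs).getD r.toNat 0 - x →
            (pvLabs cs).getD r.toNat 0 ≤ (pvLabs cs).getD (r.toNat - 1) 0 :=
          fun hb => le_of_not_gt (fun hgt => hcond (Or.inr ⟨hb, hgt⟩))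
        refine ⟨(pvDist x ((pvVals cs).getD r.toNat 0), (pvLabs cs).getD r.toNat 0),
          pvLex_to_best cs x r.toNat hRlen ?_, by rw [hlabel]⟩
        intro t htl htne
        rcases Nat.lt_trichotomy t r.toNat with htc | htc | htc
        · by_cases htL : t = r.toNat - 1
          · rcases lt_or_eq_of_le hnd with h | h
            · left
              rw [htL]
              unfold pvDist
              rw [abs_of_nonpos (by omega), abs_of_pos (by omega)]
              omega
            · right
              rw [htL]
              constructor
              · unfold pvDist
                rw [abs_of_nonpos (by omega), abs_of_pos (by omega)]
                omega
              · have hne' := pvLabs_inj cs hRlen (by omega : r.toNat - 1 < (pvVals cs).length)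
                  (by omega : r.toNat ≠ r.toNat - 1)
                have := himp (by omega)
                omega
          · left
            have h1 : (pvVals cs).getD t 0 < x := hlow t htl (by omega)
            have hmono := pvMonoLt hsort (by omega : r.toNat - 1 < (pvVals cs).length)
              (by omega : t < r.toNat - 1)
            unfold pvDist
            rw [abs_of_nonpos (by omega), abs_of_pos (by omega)]
            omega
        · exact absurd htc htne
        · left
          have hx : x ≤ (pvVals cs).getD t 0 := hhigh t htl (by omega)
          have hmono := pvMonoLt hsort htl htc
          unfold pvDist
          rw [abs_of_nonpos (by omega), abs_of_nonpos (by omega)]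
          omega

-- ---------- assembling B ----------

lemma pvB_eq_map (dados cs : List Int) :
    atribuir_etiquetas_alt dados cs =
      dados.map (fun x => pvLabel (pvVals cs) (pvLabs cs) ((pvVals cs).length : Int) x) := by
  have h : atribuir_etiquetas_alt dados cs =
      dados.foldl (fun acc x => acc ++ [(fun x =>
        pvLabel (pvVals cs) (pvLabs cs) ((pvVals cs).length : Int) x) x]) [] := rfl
  rw [h, PySem.List.foldl_append_singleton_eq_map, List.nil_append]

-- ===== VERDICT (by name: the statement is the Claim_ definition above) =====
theorem atribuir_etiquetas_spec : Claim_equal_atribuir_etiquetas := by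
  intro dados cs _ hpre
  have hpre' : cs ≠ [] := hpre
  unfold Spec_atribuir_etiquetas
  rw [pvA_eq_map, pvB_eq_map]
  apply List.map_congr_left
  intro x _
  obtain ⟨st, hbest, hsnd⟩ := pvLabel_best cs hpre' x
  have hlen0 : 0 < cs.length := List.length_pos_iff.mpr hpre'
  have hA := pvFoldA_best x cs hpre' cs.length (by omega) (le_refl _)
  have heq := pvBest_unique hA hbest
  rw [heq, hsnd]
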